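-- pv_equiv track=rewrite | github.com/fzingithub/SwordRefers2Offer | 4_LEETCODE/9_Interview/浪潮/石头排序.py | moveStoneMinNum
-- ===== SOURCE A (Python) =====
-- def moveStoneMinNum(data):
--     '''
--     分析：保持原来数组中最长递增子序列不变，移动其他石子，再用序列长度减去最长子序列个数即得答案。
--
--     dp[i] 是以 A[i-1]为尾的最长序列数长度。
--
--     dp[i] = max(dp[j-1] + 1) if data[i-1]==data[j]+1 j=0,1,...,i-2
--
--     dp[0] = 0
--     dp[1] = 1
--     res = max(dp)
--
--     T:O(n^2)
--     M:O(n)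
--     '''
--     n = len(data)
--
--     dp = [1] *(n+1)
--
--     for i in range(2,n+1):
--         for j in range(i-1):
--             if data[i-1]==data[j]+1:
--                 dp[i] = max(dp[j+1]+1, dp[i])
--
--     return n-max(dp)
-- ===== SOURCE B (Python) =====
-- def moveStoneMinNum(data):
--     best = {}      # value -> length of longest consecutive chain ending at that value
--     longest = 0
--     for x in data:
--         c = best.get(x - 1, 0) + 1
--         if c > best.get(x, 0):
--             best[x] = c
--         if c > longest:
--             longest = c
--     return len(data) - longest
-- ===== Notes on version B (the rewrite author's own statement) =====
-- stated objective: faster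
-- what changed: Replaces the O(n^2) double loop over index pairs with a single left-to-right pass keeping a dict value->longest consecutive chain ending at that value and a running maximum.
-- intended difference: On the empty list A returns -1 (0 minus the max of the padded dp table [1]) while B returns 0, the intended answer since no stone needs moving. — e.g. on moveStoneMinNum([]): A returns -1, B returns 0
import Mathlib
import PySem

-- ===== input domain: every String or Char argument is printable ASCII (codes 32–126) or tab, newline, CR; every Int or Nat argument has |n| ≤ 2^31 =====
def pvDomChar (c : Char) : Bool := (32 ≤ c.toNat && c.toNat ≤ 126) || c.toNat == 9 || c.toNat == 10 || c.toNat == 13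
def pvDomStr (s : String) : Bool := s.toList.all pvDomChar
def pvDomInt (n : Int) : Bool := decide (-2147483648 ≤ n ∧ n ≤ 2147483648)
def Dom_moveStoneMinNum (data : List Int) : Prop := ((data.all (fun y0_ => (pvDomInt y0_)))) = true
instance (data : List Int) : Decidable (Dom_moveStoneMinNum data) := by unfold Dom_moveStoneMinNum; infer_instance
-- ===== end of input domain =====

-- B replaces A's O(n^2) double index loop with one pass over the list, keeping a dict
-- value -> longest consecutive chain ending at that value and a running maximum.

-- ===== PORT A =====
def moveStoneMinNum (data : List Int) : Int :=
  let n : Int := PySem.List.len data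
  let dp : List Int := List.replicate (n + 1).toNat 1
  let dp := (PySem.List.pyRange 2 (n + 1) 1).foldl (fun dp i =>
    (PySem.List.pyRange 0 (i - 1) 1).foldl (fun dp j =>
      if PySem.List.pyGetD data (i - 1) 0 = PySem.List.pyGetD data j 0 + 1 then
        PySem.List.pySetD dp i (max (PySem.List.pyGetD dp (j + 1) 0 + 1) (PySem.List.pyGetD dp i 0))
      else dp) dp) dp
  n - (PySem.List.max? dp (fun y => y)).getD 0

-- ===== PORT B =====
def moveStoneMinNum_alt (data : List Int) : Int :=
  let s := data.foldl (fun (s : PySem.Dict Int Int × Int) x =>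
    let c := s.1.getD (x - 1) 0 + 1
    let best := if c > s.1.getD x 0 then s.1.insert x c else s.1
    let longest := if c > s.2 then c else s.2
    (best, longest)) (PySem.Dict.empty, 0)
  PySem.List.len data - s.2

-- ===== PRECONDITION & SPEC =====
-- On the empty list A returns -1 (0 minus the max of the padded dp table [1]) while B
-- returns 0, the intended answer since no stone needs moving.
def D_moveStoneMinNum (data : List Int) : Prop := data = []
instance (data : List Int) : Decidable (D_moveStoneMinNum data) := by unfold D_moveStoneMinNum; infer_instance
def Spec_moveStoneMinNum (data : List Int) (out : Int) : Prop := ¬ D_moveStoneMinNum data → out = moveStoneMinNum_alt data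
instance (data : List Int) (out : Int) : Decidable (Spec_moveStoneMinNum data out) := by unfold Spec_moveStoneMinNum; infer_instance
def pvDiffWitness_moveStoneMinNum : List Int := []
def pvDiffWitnessOut_moveStoneMinNum : Int × Int := (-1, 0)

-- ===== CLAIM (what is proved, stated in full; the proofs are below) =====
def Claim_unchanged_moveStoneMinNum : Prop := ∀ (data : List Int), Dom_moveStoneMinNum data → Spec_moveStoneMinNum data (moveStoneMinNum data)
def Claim_changed_moveStoneMinNum : Prop := Dom_moveStoneMinNum (pvDiffWitness_moveStoneMinNum) ∧ D_moveStoneMinNum (pvDiffWitness_moveStoneMinNum) ∧ moveStoneMinNum (pvDiffWitness_moveStoneMinNum) = pvDiffWitnessOut_moveStoneMinNum.1 ∧ moveStoneMinNum_alt (pvDiffWitness_moveStoneMinNum) = pvDiffWitnessOut_moveStoneMinNum.2 ∧ pvDiffWitnessOut_moveStoneMinNum.1 ≠ pvDiffWitnessOut_moveStoneMinNum.2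
def Claim_exact_moveStoneMinNum : Prop := ∀ (data : List Int), Dom_moveStoneMinNum data → D_moveStoneMinNum data → moveStoneMinNum data ≠ moveStoneMinNum_alt data

-- ===== LEMMAS AND PROOFS =====

-- longest chain ending at value v among the recorded (value, chain-length) pairs
def pvBestFor (st : List (Int × Int)) (v : Int) : Int :=
  st.foldl (fun a p => if p.1 = v then max a p.2 else a) 0

-- the (value, chain-length) pairs produced by processing l after the pairs st
def pvChainsFrom (st : List (Int × Int)) (l : List Int) : List (Int × Int) :=
  l.foldl (fun st x => st ++ [(x, pvBestFor st (x - 1) + 1)]) st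

-- the longest chain recorded in st
def pvMaxSnd (st : List (Int × Int)) : Int :=
  st.foldl (fun a p => max a p.2) 0

theorem pvChainsFrom_cons (st : List (Int × Int)) (x : Int) (l : List Int) :
    pvChainsFrom st (x :: l) = pvChainsFrom (st ++ [(x, pvBestFor st (x - 1) + 1)]) l := rfl

theorem pvChainsFrom_append_singleton (st : List (Int × Int)) (l : List Int) (x : Int) :
    pvChainsFrom st (l ++ [x]) =
      pvChainsFrom st l ++ [(x, pvBestFor (pvChainsFrom st l) (x - 1) + 1)] := by
  simp [pvChainsFrom, List.foldl_append]

theorem pvBestFor_append_singleton (st : List (Int × Int)) (p : Int × Int) (v : Int) :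
    pvBestFor (st ++ [p]) v = if p.1 = v then max (pvBestFor st v) p.2 else pvBestFor st v := by
  simp [pvBestFor, List.foldl_append]

theorem pvMaxSnd_append_singleton (st : List (Int × Int)) (p : Int × Int) :
    pvMaxSnd (st ++ [p]) = max (pvMaxSnd st) p.2 := by
  simp [pvMaxSnd, List.foldl_append]

theorem pvChainsFrom_map_fst (l : List Int) : ∀ st : List (Int × Int),
    (pvChainsFrom st l).map Prod.fst = st.map Prod.fst ++ l := by
  induction l with
  | nil => intro st; simp [pvChainsFrom]
  | cons x l ih => intro st; rw [pvChainsFrom_cons, ih]; simp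

theorem pvChainsFrom_length (l : List Int) (st : List (Int × Int)) :
    (pvChainsFrom st l).length = st.length + l.length := by
  have h := congrArg List.length (pvChainsFrom_map_fst l st)
  simpa using h

theorem pvMaxSnd_le_chainsFrom (l : List Int) : ∀ st, pvMaxSnd st ≤ pvMaxSnd (pvChainsFrom st l) := by
  induction l with
  | nil => intro st; simp [pvChainsFrom]
  | cons x l ih =>
      intro st
      rw [pvChainsFrom_cons]
      refine le_trans ?_ (ih _)
      rw [pvMaxSnd_append_singleton]
      exact le_max_left _ _

theorem pvMaxSnd_chains_pos (x : Int) (l : List Int) :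
    1 ≤ pvMaxSnd (pvChainsFrom [] (x :: l)) := by
  rw [pvChainsFrom_cons]
  refine le_trans ?_ (pvMaxSnd_le_chainsFrom l _)
  simp [pvBestFor, pvMaxSnd]

-- B-side invariant: the fold state is (best-chain dict of st, max chain length of st)
theorem pvB_invariant (l : List Int) : ∀ (d : PySem.Dict Int Int) (m : Int) (st : List (Int × Int)),
    (∀ v, d.getD v 0 = pvBestFor st v) → m = pvMaxSnd st →
    (∀ v, (l.foldl (fun (s : PySem.Dict Int Int × Int) x =>
        let c := s.1.getD (x - 1) 0 + 1
        let best := if c > s.1.getD x 0 then s.1.insert x c else s.1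
        let longest := if c > s.2 then c else s.2
        (best, longest)) (d, m)).1.getD v 0 = pvBestFor (pvChainsFrom st l) v) ∧
    (l.foldl (fun (s : PySem.Dict Int Int × Int) x =>
        let c := s.1.getD (x - 1) 0 + 1
        let best := if c > s.1.getD x 0 then s.1.insert x c else s.1
        let longest := if c > s.2 then c else s.2
        (best, longest)) (d, m)).2 = pvMaxSnd (pvChainsFrom st l) := by
  induction l with
  | nil => intro d m st hd hm; exact ⟨hd, hm⟩
  | cons x l ih =>
      intro d m st hd hm
      simp only [List.foldl_cons]
      rw [pvChainsFrom_cons]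
      set c := d.getD (x - 1) 0 + 1 with hc
      have hcb : c = pvBestFor st (x - 1) + 1 := by rw [hc, hd]
      rw [← hcb]
      apply ih
      · intro v
        by_cases hlt : c > d.getD x 0
        · simp only [hlt, if_pos]
          rw [pvBestFor_append_singleton]
          rw [PySem.Dict.getD_insert]
          by_cases hv : v = x
          · subst hv
            rw [if_pos rfl, if_pos rfl]
            have := hd v
            omega
          · rw [if_neg hv, if_neg (fun h => hv h.symm), hd]
        · simp only [gt_iff_lt, if_neg hlt]
          rw [pvBestFor_append_singleton]
          by_cases hv : x = v
          · subst hv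
            rw [if_pos rfl, hd]
            have := hd x
            omega
          · rw [if_neg hv, hd]
      · rw [pvMaxSnd_append_singleton, ← hm]
        by_cases h2 : c > m
        · rw [if_pos h2]; omega
        · rw [if_neg h2]; omega

-- shape of the dp list after writing slot k+1
theorem pvSetShape (vals : List Int) (n k : Nat) (v : Int) (hv : vals.length = k) (hk : k < n) :
    (1 :: vals ++ List.replicate (n - k) 1).set (k + 1) v
      = 1 :: (vals ++ [v]) ++ List.replicate (n - (k + 1)) 1 := by
  have h1 : n - k = (n - (k+1)) + 1 := by omega
  show 1 :: (vals ++ List.replicate (n - k) 1).set k v = _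
  rw [List.set_append_right _ _ (by omega), hv]
  simp [h1, List.replicate_succ]

theorem pvSetId (vals : List Int) (n k : Nat) (hv : vals.length = k) (hk : k < n) :
    (1 :: vals ++ List.replicate (n - k) 1).set (k + 1) 1
      = 1 :: vals ++ List.replicate (n - k) 1 := by
  rw [pvSetShape vals n k 1 hv hk]
  have h1 : n - k = (n - (k+1)) + 1 := by omega
  simp [h1, List.replicate_succ]

-- INNER LOOP of A: only slot k+1 of the dp list changes, accumulating the chain value
theorem pvInner (data : List Int) (k : Nat) (hk : k < data.length)
    (w : List (Int × Int)) : ∀ (m : Nat) (a : Int), m + w.length = k →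
    (pvChainsFrom [] (data.take k)).drop m = w →
    (PySem.List.pyRange (m : Int) (k : Int) 1).foldl
      (fun (dp : List Int) (j : Int) =>
        if PySem.List.pyGetD data ((k : Int) + 1 - 1) 0 = PySem.List.pyGetD data j 0 + 1 then
          PySem.List.pySetD dp ((k : Int) + 1)
            (max (PySem.List.pyGetD dp (j + 1) 0 + 1) (PySem.List.pyGetD dp ((k : Int) + 1) 0))
        else dp)
      ((1 :: (pvChainsFrom [] (data.take k)).map Prod.snd ++ List.replicate (data.length - k) 1).set (k + 1) a)
    = (1 :: (pvChainsFrom [] (data.take k)).map Prod.snd ++ List.replicate (data.length - k) 1).set (k + 1)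
        (w.foldl (fun (a : Int) (p : Int × Int) => if data[k] = p.1 + 1 then max (p.2 + 1) a else a) a) := by
  induction w with
  | nil =>
      intro m a hm _
      have hmk : m = k := by simpa using hm
      have : (m : Int) = (k : Int) := by omega
      rw [this, PySem.List.pyRange_one_eq_nil le_rfl]
      simp
  | cons p w ih =>
      intro m a hm hdrop
      have hm' : m + w.length + 1 = k := by simpa using hm
      have hmlt : m < k := by omega
      have hlen : (pvChainsFrom [] (data.take k)).length = k := by
        rw [pvChainsFrom_length]; simp; omega
      have hstm : (pvChainsFrom [] (data.take k))[m]? = some p := by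
        have h0 := congrArg (fun l : List (Int × Int) => l[0]?) hdrop
        simpa [List.getElem?_drop] using h0
      have hp1 : data[m]? = some p.1 := by
        have h1 : ((pvChainsFrom [] (data.take k)).map Prod.fst)[m]? = some p.1 := by
          rw [List.getElem?_map, hstm]; rfl
        rw [pvChainsFrom_map_fst] at h1
        simpa [List.getElem?_take, hmlt] using h1
      have hp2 : ((pvChainsFrom [] (data.take k)).map Prod.snd)[m]? = some p.2 := by
        rw [List.getElem?_map, hstm]; rfl
      set st := pvChainsFrom [] (data.take k) with hst
      set dpk : List Int := 1 :: st.map Prod.snd ++ List.replicate (data.length - k) 1 with hdpk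
      have hdpl : dpk.length = data.length + 1 := by
        rw [hdpk]; simp [hlen]; omega
      rw [PySem.List.pyRange_one_cons (by exact_mod_cast hmlt)]
      rw [List.foldl_cons]
      have e1 : ((k : Int) + 1 - 1) = ((k : Nat) : Int) := by omega
      have ecm : ((m : Int) + 1) = (((m + 1 : Nat)) : Int) := by push_cast; ring
      have eck : ((k : Int) + 1) = (((k + 1 : Nat)) : Int) := by push_cast; ring
      have c1 : PySem.List.pyGetD data ((k : Nat) : Int) 0 = data[k] := by
        rw [PySem.List.pyGetD_natCast]
        simp [List.getD_eq_getElem?_getD, List.getElem?_eq_getElem hk]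
      have c2 : PySem.List.pyGetD data ((m : Nat) : Int) 0 = p.1 := by
        rw [PySem.List.pyGetD_natCast]
        simp [List.getD_eq_getElem?_getD, hp1]
      have c3 : PySem.List.pyGetD (dpk.set (k + 1) a) (((m + 1 : Nat)) : Int) 0 = p.2 := by
        rw [PySem.List.pyGetD_natCast]
        rw [List.getD_eq_getElem?_getD, List.getElem?_set_ne (by omega)]
        rw [hdpk]
        rw [show ((1 : Int) :: List.map Prod.snd st ++ List.replicate (data.length - k) 1)[m + 1]?
              = (List.map Prod.snd st ++ List.replicate (data.length - k) 1)[m]? from List.getElem?_cons_succ]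
        rw [List.getElem?_append_left (by simp [hlen]; omega)]
        simp [hp2]
      have c4 : PySem.List.pyGetD (dpk.set (k + 1) a) (((k + 1 : Nat)) : Int) 0 = a := by
        rw [PySem.List.pyGetD_natCast]
        rw [List.getD_eq_getElem?_getD, List.getElem?_set_self (by omega)]
        rfl
      have c5 : ∀ v : Int, PySem.List.pySetD (dpk.set (k + 1) a) (((k + 1 : Nat)) : Int) v = dpk.set (k + 1) v := by
        intro v
        rw [PySem.List.pySetD_natCast, List.set_set]
      have hbody :
          (if PySem.List.pyGetD data ((k : Int) + 1 - 1) 0 = PySem.List.pyGetD data ((m : Nat) : Int) 0 + 1 then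
              PySem.List.pySetD (dpk.set (k + 1) a) ((k : Int) + 1)
                (max (PySem.List.pyGetD (dpk.set (k + 1) a) (((m : Nat) : Int) + 1) 0 + 1)
                     (PySem.List.pyGetD (dpk.set (k + 1) a) ((k : Int) + 1) 0))
            else dpk.set (k + 1) a)
          = dpk.set (k + 1) (if data[k] = p.1 + 1 then max (p.2 + 1) a else a) := by
        rw [e1, ecm, eck, c1, c2, c3, c4, c5]
        split_ifs with h
        · rfl
        · rfl
      rw [hbody]
      have hdrop' : st.drop (m + 1) = w := by
        have h1 := congrArg (fun l : List (Int × Int) => l.drop 1) hdrop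
        simpa [List.drop_drop, Nat.add_comm] using h1
      rw [ecm]
      simp only [List.foldl_cons]
      exact ih (m + 1) _ (by omega) hdrop'

-- value computed by A's inner loop: 1 + best chain ending at data[k] - 1
theorem pvInner_value (x : Int) (st : List (Int × Int)) : ∀ a : Int,
    st.foldl (fun a p => if x = p.1 + 1 then max (p.2 + 1) a else a) (a + 1) =
      st.foldl (fun a p => if p.1 = x - 1 then max a p.2 else a) a + 1 := by
  induction st with
  | nil => intro a; simp
  | cons p st ih =>
      intro a
      simp only [List.foldl_cons]
      rw [show (if x = p.1 + 1 then max (p.2 + 1) (a + 1) else a + 1)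
            = (if p.1 = x - 1 then max a p.2 else a) + 1 by
        by_cases h : p.1 = x - 1
        · rw [if_pos (by omega), if_pos h]; omega
        · rw [if_neg (by omega), if_neg h]]
      exact ih _

-- OUTER LOOP of A: after the iterations up to k, the dp list holds the chain lengths
-- of the first k elements (and untouched 1-entries beyond)
theorem pvOuter (data : List Int) : ∀ (k : Nat), 1 ≤ k → k ≤ data.length →
    (PySem.List.pyRange 2 ((k : Int) + 1) 1).foldl
      (fun (dp : List Int) (i : Int) =>
        (PySem.List.pyRange 0 (i - 1) 1).foldl
          (fun (dp : List Int) (j : Int) =>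
            if PySem.List.pyGetD data (i - 1) 0 = PySem.List.pyGetD data j 0 + 1 then
              PySem.List.pySetD dp i (max (PySem.List.pyGetD dp (j + 1) 0 + 1) (PySem.List.pyGetD dp i 0))
            else dp) dp)
      (List.replicate ((data.length : Int) + 1).toNat 1)
    = 1 :: (pvChainsFrom [] (data.take k)).map Prod.snd ++ List.replicate (data.length - k) 1 := by
  intro k hk1
  induction k, hk1 using Nat.le_induction with
  | base =>
      intro hle
      rw [show ((1 : Nat) : Int) + 1 = 2 by norm_num, PySem.List.pyRange_one_eq_nil le_rfl]
      cases data with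
      | nil => simp at hle
      | cons d rest =>
          show List.replicate ((((rest.length + 1 : Nat)) : Int) + 1).toNat 1 = _
          rw [show ((((rest.length + 1 : Nat)) : Int) + 1).toNat = rest.length + 2 by omega]
          show _ = 1 :: (pvChainsFrom [] [d]).map Prod.snd ++ List.replicate (rest.length + 1 - 1) 1
          show _ = 1 :: ([((d : Int), (1 : Int))]).map Prod.snd ++ List.replicate (rest.length + 1 - 1) 1
          simp [List.replicate_succ]
  | succ k hk1 ih =>
      intro hle
      have hk : k < data.length := by omega
      have hlen : (pvChainsFrom [] (data.take k)).length = k := by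
        rw [pvChainsFrom_length]; simp; omega
      rw [show (((k + 1 : Nat)) : Int) + 1 = ((k : Int) + 1) + 1 by push_cast; ring]
      rw [PySem.List.pyRange_one_succ_right (by omega), List.foldl_append, List.foldl_cons, List.foldl_nil]
      rw [ih (by omega)]
      rw [show PySem.List.pyRange 0 ((k : Int) + 1 - 1) 1 = PySem.List.pyRange 0 ((k : Nat) : Int) 1 by
        rw [show ((k : Int) + 1 - 1) = ((k : Nat) : Int) by omega]]
      rw [show (1 :: (pvChainsFrom [] (data.take k)).map Prod.snd ++ List.replicate (data.length - k) 1)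
            = (1 :: (pvChainsFrom [] (data.take k)).map Prod.snd ++ List.replicate (data.length - k) 1).set (k + 1) 1 from
          (pvSetId _ data.length k (by simp [hlen]) hk).symm]
      have hinner := pvInner data k hk (pvChainsFrom [] (data.take k)) 0 1 (by simp [hlen]) (by simp)
      simp only [Nat.cast_zero] at hinner
      rw [hinner]
      have hv := pvInner_value data[k] (pvChainsFrom [] (data.take k)) 0
      norm_num at hv
      rw [hv]
      rw [pvSetShape _ data.length k _ (by simp [hlen]) hk]
      rw [show data.take (k + 1) = data.take k ++ [data[k]] by
        rw [List.take_add_one, List.getElem?_eq_getElem hk]; rfl]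
      rw [pvChainsFrom_append_singleton]
      simp [pvBestFor]

theorem pvFoldl_max_init (st : List (Int × Int)) : ∀ a b : Int,
    st.foldl (fun a p => max a p.2) (max a b) = max a (st.foldl (fun a p => max a p.2) b) := by
  induction st with
  | nil => intro a b; simp
  | cons p st ih =>
      intro a b
      simp only [List.foldl_cons]
      rw [max_assoc, ih]

-- A returns n minus the longest recorded chain (for nonempty input)
theorem pvA_eq (d : Int) (rest : List Int) :
    moveStoneMinNum (d :: rest) = ((d :: rest).length : Int) - pvMaxSnd (pvChainsFrom [] (d :: rest)) := by
  show PySem.List.len (d :: rest) -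
      (PySem.List.max? ((PySem.List.pyRange 2 (PySem.List.len (d :: rest) + 1) 1).foldl
        (fun (dp : List Int) (i : Int) =>
          (PySem.List.pyRange 0 (i - 1) 1).foldl
            (fun (dp : List Int) (j : Int) =>
              if PySem.List.pyGetD (d :: rest) (i - 1) 0 = PySem.List.pyGetD (d :: rest) j 0 + 1 then
                PySem.List.pySetD dp i (max (PySem.List.pyGetD dp (j + 1) 0 + 1) (PySem.List.pyGetD dp i 0))
              else dp) dp)
        (List.replicate (PySem.List.len (d :: rest) + 1).toNat 1)) (fun y => y)).getD 0 = _
  simp only [PySem.List.len_eq]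
  rw [pvOuter (d :: rest) (d :: rest).length (by simp) le_rfl]
  rw [List.take_length, Nat.sub_self]
  rw [show List.replicate 0 (1 : Int) = [] from rfl, List.append_nil]
  rw [PySem.List.max?_id_cons]
  rw [Option.getD_some]
  rw [List.foldl_map]
  rw [show (1 : Int) = max 1 0 from rfl, pvFoldl_max_init]
  rw [max_eq_right (by simpa [pvMaxSnd] using pvMaxSnd_chains_pos d rest)]
  rfl

-- B returns n minus the longest recorded chain
theorem pvB_eq (data : List Int) :
    moveStoneMinNum_alt data = (data.length : Int) - pvMaxSnd (pvChainsFrom [] data) := by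
  show PySem.List.len data - (data.foldl (fun (s : PySem.Dict Int Int × Int) x =>
      let c := s.1.getD (x - 1) 0 + 1
      let best := if c > s.1.getD x 0 then s.1.insert x c else s.1
      let longest := if c > s.2 then c else s.2
      (best, longest)) (PySem.Dict.empty, 0)).2 = _
  rw [(pvB_invariant data PySem.Dict.empty 0 []
      (by intro v; simp [pvBestFor, PySem.Dict.getD_empty]) rfl).2]
  simp [PySem.List.len_eq]

-- ===== VERDICT (by name: the statement is the Claim_ definition above) =====
theorem moveStoneMinNum_spec : Claim_unchanged_moveStoneMinNum := by
  intro data _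
  unfold Spec_moveStoneMinNum D_moveStoneMinNum
  intro hne
  cases data with
  | nil => exact absurd rfl hne
  | cons d rest => rw [pvA_eq, pvB_eq]

theorem moveStoneMinNum_changed : Claim_changed_moveStoneMinNum := by
  unfold Claim_changed_moveStoneMinNum; decide

theorem moveStoneMinNum_tight : Claim_exact_moveStoneMinNum := by
  intro data _ hd
  unfold D_moveStoneMinNum at hd
  subst hd
  decide
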